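-- pv_equiv track=rewrite | github.com/kingkaushalagarwal/100daysofcoding | problem_solving/distribute_candies.py | solve
-- ===== SOURCE A (Python) =====
-- def solve(A, B, C):
--     if A==2:
--         return min(B,C)
--     c=2
--     x = (B+C)//A
--     while c<A:
--         if B>C:
--             B-=x
--         else:
--             C-=x
--         c+=1
--     return min(x,B,C)
-- ===== SOURCE B (Python) =====
-- def solve(A, B, C):
--     # O(1) closed form: A's loop subtracts x from the larger of B,C for A-2 steps;
--     # compute the final pair arithmetically instead of iterating.
--     if A == 2:
--         return min(B, C)
--     x = (B + C) // A
--     n = A - 2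
--     if n <= 0 or x == 0:
--         return min(x, B, C)
--     if x < 0:
--         # subtracting a negative only grows the larger side, so every step hits it
--         if B > C:
--             B -= n * x
--         else:
--             C -= n * x
--         return min(x, B, C)
--     # x > 0: phase 1 drives the larger side down to (just below) the other,
--     # then the two sides strictly alternate, each losing x per two steps.
--     if B > C:
--         k1 = min(n, -(-(B - C) // x))      # ceil((B-C)/x) steps taken from B
--         rem = n - k1
--         B -= k1 * x + rem // 2 * x
--         C -= (rem + 1) // 2 * x            # after phase 1 the next target is C
--     else:
--         k1 = min(n, (C - B) // x + 1)      # steps taken from C until B > C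
--         rem = n - k1
--         B -= (rem + 1) // 2 * x            # after phase 1 the next target is B
--         C -= k1 * x + rem // 2 * x
--     return min(x, B, C)
-- ===== Notes on version B (the rewrite author's own statement) =====
-- stated objective: faster
-- what changed: Replaces the A-2-step subtraction loop with O(1) closed-form arithmetic: a ceiling-division computes how many steps drain the larger side, after which the two sides strictly alternate and each loses x per two steps, so both final values are obtained directly.
import Mathlib
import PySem

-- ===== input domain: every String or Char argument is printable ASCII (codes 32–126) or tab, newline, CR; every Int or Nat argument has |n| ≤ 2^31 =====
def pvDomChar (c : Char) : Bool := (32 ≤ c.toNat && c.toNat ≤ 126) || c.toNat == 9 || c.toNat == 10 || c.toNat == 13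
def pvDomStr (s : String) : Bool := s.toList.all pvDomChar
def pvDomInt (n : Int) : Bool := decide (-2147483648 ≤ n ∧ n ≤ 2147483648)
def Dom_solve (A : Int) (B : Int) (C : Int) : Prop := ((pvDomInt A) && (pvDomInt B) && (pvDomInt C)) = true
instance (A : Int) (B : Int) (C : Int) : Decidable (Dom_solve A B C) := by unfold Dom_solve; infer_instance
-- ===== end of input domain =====

-- ===== PORT A =====
-- B replaces A's A-2-step subtraction loop with O(1) closed-form arithmetic (objective: faster).
-- Loop of A: while c < A, subtract x from the larger of B, C (ties go to C).
def solveLoopA (x : Int) : Nat → Int → Int → Int × Int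
  | 0, B, C => (B, C)
  | Nat.succ m, b, c => if b > c then solveLoopA x m (b - x) c else solveLoopA x m b (c - x)

def solve (A : Int) (B : Int) (C : Int) : Int :=
  if A = 2 then min B C
  else
    let x := PySem.Int.floordiv (B + C) A
    let p := solveLoopA x (A - 2).toNat B C
    min x (min p.1 p.2)

-- ===== PORT B =====
-- O(1) closed form of the same process (see Source B): phase 1 drains the larger
-- side, then the two sides strictly alternate, each losing x per two steps.
def solve_alt (A : Int) (B : Int) (C : Int) : Int :=
  if A = 2 then min B C
  else
    let x := PySem.Int.floordiv (B + C) A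
    let n := A - 2
    if n ≤ 0 ∨ x = 0 then min x (min B C)
    else if x < 0 then
      if B > C then min x (min (B - n * x) C) else min x (min B (C - n * x))
    else
      if B > C then
        let k1 := min n (-(PySem.Int.floordiv (-(B - C)) x))
        let rem := n - k1
        min x (min (B - (k1 * x + PySem.Int.floordiv rem 2 * x))
                   (C - PySem.Int.floordiv (rem + 1) 2 * x))
      else
        let k1 := min n (PySem.Int.floordiv (C - B) x + 1)
        let rem := n - k1
        min x (min (B - PySem.Int.floordiv (rem + 1) 2 * x)
                   (C - (k1 * x + PySem.Int.floordiv rem 2 * x)))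

-- ===== PRECONDITION & SPEC =====
-- Pre_ excludes only A = 0, where the Python A raises ZeroDivisionError on (B+C)//A.
def Pre_solve (A : Int) (B : Int) (C : Int) : Prop := A ≠ 0
instance (A : Int) (B : Int) (C : Int) : Decidable (Pre_solve A B C) := by unfold Pre_solve; infer_instance
def pvWitness_solve : Int × Int × Int := (5, 7, 3)
def Spec_solve (A : Int) (B : Int) (C : Int) (out : Int) : Prop := out = solve_alt A B C
instance (A : Int) (B : Int) (C : Int) (out : Int) : Decidable (Spec_solve A B C out) := by unfold Spec_solve; infer_instance

-- ===== CLAIM (what is proved, stated in full; the proofs are below) =====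
def Claim_equal_solve : Prop := ∀ (A : Int) (B : Int) (C : Int), Dom_solve A B C → Pre_solve A B C → Spec_solve A B C (solve A B C)

-- ===== LEMMAS AND PROOFS =====

-- closed form for the loop when 0 < x (proof helper; mirrors the x > 0 branch of solve_alt)
def cfPos (x n B C : Int) : Int × Int :=
  if B > C then
    let k1 := min n (-(PySem.Int.floordiv (-(B - C)) x))
    let rem := n - k1
    (B - (k1 * x + PySem.Int.floordiv rem 2 * x), C - PySem.Int.floordiv (rem + 1) 2 * x)
  else
    let k1 := min n (PySem.Int.floordiv (C - B) x + 1)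
    let rem := n - k1
    (B - PySem.Int.floordiv (rem + 1) 2 * x, C - (k1 * x + PySem.Int.floordiv rem 2 * x))

theorem ceil_bounds (x d : Int) (hx : 0 < x) :
    (-(PySem.Int.floordiv (-d) x) - 1) * x < d ∧ d ≤ -(PySem.Int.floordiv (-d) x) * x :=
  (PySem.Int.neg_floordiv_neg_eq_iff_of_pos hx).mp rfl

theorem floor_bounds (x d : Int) (hx : 0 < x) :
    PySem.Int.floordiv d x * x ≤ d ∧ d < (PySem.Int.floordiv d x + 1) * x :=
  (PySem.Int.floordiv_eq_iff_of_pos hx).mp rfl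

theorem ceil_shift (x d : Int) (hx : 0 < x) :
    -(PySem.Int.floordiv (-(d - x)) x) = -(PySem.Int.floordiv (-d) x) - 1 := by
  obtain ⟨h1, h2⟩ := ceil_bounds x d hx
  rw [PySem.Int.neg_floordiv_neg_eq_iff_of_pos hx]
  constructor <;> nlinarith

theorem floor_shift (x d : Int) (hx : 0 < x) :
    PySem.Int.floordiv (d - x) x = PySem.Int.floordiv d x - 1 := by
  obtain ⟨h1, h2⟩ := floor_bounds x d hx
  rw [PySem.Int.floordiv_eq_iff_of_pos hx]
  constructor <;> nlinarith

theorem ceil_eq_one (x d : Int) (hx : 0 < x) (h0 : 0 < d) (h1 : d ≤ x) :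
    -(PySem.Int.floordiv (-d) x) = 1 := by
  rw [PySem.Int.neg_floordiv_neg_eq_iff_of_pos hx]
  constructor <;> nlinarith

theorem floor_eq_zero (x d : Int) (hx : 0 < x) (h0 : 0 ≤ d) (h1 : d < x) :
    PySem.Int.floordiv d x = 0 := by
  rw [PySem.Int.floordiv_eq_iff_of_pos hx]
  constructor <;> nlinarith

theorem ceil_ge_one (x d : Int) (hx : 0 < x) (hd : 0 < d) :
    1 ≤ -(PySem.Int.floordiv (-d) x) := by
  obtain ⟨h1, h2⟩ := ceil_bounds x d hx
  nlinarith

theorem floor_nonneg (x d : Int) (hx : 0 < x) (hd : 0 ≤ d) :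
    0 ≤ PySem.Int.floordiv d x := by
  obtain ⟨h1, h2⟩ := floor_bounds x d hx
  nlinarith

theorem fd2 (a : Int) : PySem.Int.floordiv a 2 = a / 2 :=
  PySem.Int.floordiv_eq_ediv_of_pos (by norm_num)

theorem loop_zero (n : Nat) (B C : Int) : solveLoopA 0 n B C = (B, C) := by
  induction n generalizing B C with
  | zero => rfl
  | succ n ih => simp [solveLoopA, ih]

theorem loop_neg (x : Int) (hx : x < 0) (n : Nat) (B C : Int) :
    solveLoopA x n B C = if B > C then (B - n * x, C) else (B, C - n * x) := by
  induction n generalizing B C with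
  | zero => simp [solveLoopA]
  | succ n ih =>
    by_cases h : B > C
    · have h2 : B - x > C := by omega
      simp only [solveLoopA, if_pos h, ih, if_pos h2]
      push_cast; ring_nf
    · have h2 : ¬ (B > C - x) := by omega
      simp only [solveLoopA, if_neg h, ih, if_neg h2]
      push_cast; ring_nf

theorem loop_pos (x : Int) (hx : 0 < x) (n : Nat) (B C : Int) :
    solveLoopA x n B C = cfPos x (n : Int) B C := by
  induction n generalizing B C with
  | zero =>
    simp only [solveLoopA, cfPos, Nat.cast_zero]
    split_ifs with h
    · have hc : 1 ≤ -(PySem.Int.floordiv (-(B - C)) x) := ceil_ge_one x (B - C) hx (by omega)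
      rw [show min (0:Int) (-(PySem.Int.floordiv (-(B - C)) x)) = 0 by omega]
      simp
    · have hq : 0 ≤ PySem.Int.floordiv (C - B) x := floor_nonneg x (C - B) hx (by omega)
      rw [show min (0:Int) (PySem.Int.floordiv (C - B) x + 1) = 0 by omega]
      simp
  | succ n ih =>
    simp only [solveLoopA]
    push_cast
    by_cases h : B > C
    · rw [if_pos h, ih]
      by_cases h2 : B - x > C
      · -- still in phase 1 on the B side
        obtain ⟨hb1, hb2⟩ := ceil_bounds x (B - C) hx
        have hc2 : 2 ≤ -(PySem.Int.floordiv (-(B - C)) x) := by nlinarith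
        have h3 : B - x > C := h2
        simp only [cfPos, if_pos h, if_pos h3]
        rw [show B - x - C = (B - C) - x by ring, ceil_shift x (B - C) hx]
        set c := -(PySem.Int.floordiv (-(B - C)) x) with hcdef
        rw [show min ((n:Int)) (c - 1) = min ((n:Int) + 1) c - 1 by omega]
        rw [show (n:Int) - (min ((n:Int) + 1) c - 1) = (n:Int) + 1 - min ((n:Int) + 1) c by ring]
        simp only [Prod.mk.injEq]
        exact ⟨by ring, trivial⟩
      · -- last phase-1 step on the B side: 0 < B - C ≤ x
        have hc1 : -(PySem.Int.floordiv (-(B - C)) x) = 1 :=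
          ceil_eq_one x (B - C) hx (by omega) (by omega)
        have hq0 : PySem.Int.floordiv (C - (B - x)) x = 0 :=
          floor_eq_zero x (C - (B - x)) hx (by omega) (by omega)
        simp only [cfPos, if_pos h, if_neg h2, hc1, hq0]
        rw [show min ((n:Int) + 1) 1 = 1 by omega]
        by_cases hn : (n:Int) = 0
        · rw [hn]
          norm_num [fd2]
        · rw [show min ((n:Int)) (0 + 1) = 1 by omega,
            show (n:Int) - 1 + 1 = (n:Int) by ring]
          simp only [fd2]
          rw [show ((n:Int) + 1 - 1 + 1) = (n:Int) + 1 by ring,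
            show ((n:Int) + 1 - 1) = (n:Int) by ring,
            show ((n:Int) + 1) / 2 = ((n:Int) - 1) / 2 + 1 by omega]
          simp only [Prod.mk.injEq]
          exact ⟨by ring, by ring⟩
    · rw [if_neg h, ih]
      by_cases h2 : B > C - x
      · -- last phase-1 step on the C side: 0 ≤ C - B < x
        have hq0 : PySem.Int.floordiv (C - B) x = 0 :=
          floor_eq_zero x (C - B) hx (by omega) (by omega)
        have hc1 : -(PySem.Int.floordiv (-(B - (C - x))) x) = 1 :=
          ceil_eq_one x (B - (C - x)) hx (by omega) (by omega)
        simp only [cfPos, if_neg h, if_pos h2, hc1, hq0]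
        rw [show min ((n:Int) + 1) (0 + 1) = 1 by omega]
        by_cases hn : (n:Int) = 0
        · rw [hn]
          norm_num [fd2]
        · rw [show min ((n:Int)) 1 = 1 by omega,
            show (n:Int) - 1 + 1 = (n:Int) by ring]
          simp only [fd2]
          rw [show ((n:Int) + 1 - 1 + 1) = (n:Int) + 1 by ring,
            show ((n:Int) + 1 - 1) = (n:Int) by ring,
            show ((n:Int) + 1) / 2 = ((n:Int) - 1) / 2 + 1 by omega]
          simp only [Prod.mk.injEq]
          exact ⟨by ring, by ring⟩
      · -- still in phase 1 on the C side
        obtain ⟨hb1, hb2⟩ := floor_bounds x (C - B) hx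
        have hq1 : 1 ≤ PySem.Int.floordiv (C - B) x := by nlinarith
        simp only [cfPos, if_neg h, if_neg h2]
        rw [show C - x - B = (C - B) - x by ring, floor_shift x (C - B) hx]
        set q := PySem.Int.floordiv (C - B) x with hqdef
        rw [show min ((n:Int)) (q - 1 + 1) = min ((n:Int) + 1) (q + 1) - 1 by omega]
        rw [show (n:Int) - (min ((n:Int) + 1) (q + 1) - 1) = (n:Int) + 1 - min ((n:Int) + 1) (q + 1) by ring]
        simp only [Prod.mk.injEq]
        exact ⟨trivial, by ring⟩

-- ===== VERDICT (by name: the statement is the Claim_ definition above) =====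
theorem solve_spec : Claim_equal_solve := by
  intro A B C _ hpre
  unfold Spec_solve solve solve_alt
  by_cases hA : A = 2
  · simp [hA]
  · simp only [if_neg hA]
    by_cases h1 : A - 2 ≤ 0 ∨ PySem.Int.floordiv (B + C) A = 0
    · rw [if_pos h1]
      rcases h1 with h1 | h1
      · rw [show (A - 2).toNat = 0 by omega]
        rfl
      · rw [h1, loop_zero]
    · rw [if_neg h1]
      simp only [not_or, not_le] at h1
      obtain ⟨hn, hx0⟩ := h1
      have hcast : (((A - 2).toNat : Nat) : Int) = A - 2 := by omega
      by_cases h2 : PySem.Int.floordiv (B + C) A < 0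
      · rw [if_pos h2, loop_neg _ h2, hcast]
        by_cases hbc : B > C <;> simp [hbc]
      · rw [if_neg h2, loop_pos _ (by omega), hcast]
        simp only [cfPos]
        by_cases hbc : B > C <;> simp [hbc]
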